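-- pv_equiv track=rewrite | github.com/Lucas-De/Combinatorial-Optimization | Main.py | multipleMax
-- ===== SOURCE A (Python) =====
-- def multipleMax(numberList):
--     maxNumber = max(numberList)
--     count = 0
--     for number in numberList:
--         if number == maxNumber:
--             count += 1
--
--     if count > 1:
--         return True
--     else:
--         return False
-- ===== SOURCE B (Python) =====
-- def multipleMax(numberList):
--     s = sorted(numberList)
--     return len(s) >= 2 and s[-1] == s[-2]
-- ===== Notes on version B (the rewrite author's own statement) =====
-- stated objective: simpler
-- what changed: Replaces the explicit max computation plus a counting scan with a single sort and one comparison of the two largest positions (max occurs more than once iff s[-1] == s[-2] after sorting).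
-- outside the precondition, e.g. on multipleMax([]): A raises ValueError, B returns False
import Mathlib
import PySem

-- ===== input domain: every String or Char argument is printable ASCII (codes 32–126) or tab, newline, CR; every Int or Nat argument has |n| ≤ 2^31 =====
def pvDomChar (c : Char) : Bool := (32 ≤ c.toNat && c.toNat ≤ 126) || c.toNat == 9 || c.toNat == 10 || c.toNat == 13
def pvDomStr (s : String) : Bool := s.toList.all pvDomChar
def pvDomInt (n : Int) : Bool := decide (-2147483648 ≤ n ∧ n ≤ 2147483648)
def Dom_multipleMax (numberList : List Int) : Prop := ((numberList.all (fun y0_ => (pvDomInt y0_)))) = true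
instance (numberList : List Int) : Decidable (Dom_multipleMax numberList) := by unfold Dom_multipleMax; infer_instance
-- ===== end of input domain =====

-- B replaces A's max + counting scan by one sort and a comparison of the two largest positions; objective: simpler.
-- Return-value equivalence on non-empty lists; on [] A raises ValueError (max([])), excluded by Pre_.

-- ===== PORT A =====
def multipleMax (numberList : List Int) : Bool :=
  match PySem.List.max? numberList (fun x => x) with
  | none => false  -- Python's max([]) raises ValueError; excluded by Pre_
  | some maxNumber =>
    let count : Int := numberList.foldl (fun c number => if number == maxNumber then c + 1 else c) 0
    if count > 1 then true else false

-- ===== PORT B =====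
def multipleMax_alt (numberList : List Int) : Bool :=
  let s := PySem.List.sorted numberList (fun x => x) false
  decide (2 ≤ s.length) && (PySem.List.pyGet? s (-1) == PySem.List.pyGet? s (-2))

-- ===== PRECONDITION & SPEC =====
-- Pre_ excludes only the empty list, on which A raises ValueError (max([])).
def Pre_multipleMax (numberList : List Int) : Prop := numberList ≠ []
instance (numberList : List Int) : Decidable (Pre_multipleMax numberList) := by unfold Pre_multipleMax; infer_instance
def pvWitness_multipleMax : List Int := [3, 1, 3]

def Spec_multipleMax (numberList : List Int) (out : Bool) : Prop := out = multipleMax_alt numberList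
instance (numberList : List Int) (out : Bool) : Decidable (Spec_multipleMax numberList out) := by unfold Spec_multipleMax; infer_instance

-- ===== CLAIM (what is proved, stated in full; the proofs are below) =====
def Claim_equal_multipleMax : Prop := ∀ (numberList : List Int), Dom_multipleMax numberList → Pre_multipleMax numberList → Spec_multipleMax numberList (multipleMax numberList)

-- ===== LEMMAS AND PROOFS =====

theorem multipleMax_eq_alt (l : List Int) (hne : l ≠ []) :
    multipleMax l = multipleMax_alt l := by
  obtain ⟨m, hm⟩ : ∃ m, PySem.List.max? l (fun x => x) = some m := by
    cases h : PySem.List.max? l (fun x => x) with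
    | none => exact absurd ((PySem.List.max?_eq_none_iff l _).mp h) hne
    | some m => exact ⟨m, rfl⟩
  have hmem : m ∈ l := PySem.List.max?_mem hm
  have hmax : ∀ y ∈ l, y ≤ m := PySem.List.max?_isMax hm
  set s := PySem.List.sorted l (fun x => x) false with hs
  have hperm : s.Perm l := PySem.List.sorted_perm l _ false
  have hcount : s.count m = l.count m := hperm.count_eq m
  have hlen : l.length = s.length := (hperm.length_eq).symm
  have hk1 : 1 ≤ s.length := by
    rcases Nat.eq_zero_or_pos s.length with h0 | h1
    · exact absurd (List.eq_nil_of_length_eq_zero (hlen.trans h0)) hne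
    · exact h1
  have hmono : ∀ {p q : ℕ} (hpq : p ≤ q) (hq : q < s.length), s[p]'(lt_of_le_of_lt hpq hq) ≤ s[q] := by
    intro p q hpq hq
    exact PySem.List.key_sorted_getElem_mono l (fun x => x) hpq hq
  have hlast : s[s.length - 1]'(by omega) = m := by
    obtain ⟨i, hi, hsi⟩ := List.mem_iff_getElem.mp (hperm.mem_iff.mpr hmem)
    have h1 : m ≤ s[s.length - 1]'(by omega) := hsi ▸ hmono (by omega) (by omega)
    have h2 : s[s.length - 1]'(by omega) ≤ m :=
      hmax _ (hperm.mem_iff.mp (List.getElem_mem _))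
    omega
  unfold multipleMax multipleMax_alt
  rw [hm]
  simp only [PySem.List.foldl_beq_add_one, zero_add, ← hs]
  rcases Nat.lt_or_ge s.length 2 with hk | hk
  · -- single element: count is 1, B's length test fails
    have : l.count m ≤ 1 := by
      calc l.count m = s.count m := hcount.symm
        _ ≤ s.length := List.count_le_length
        _ ≤ 1 := by omega
    rw [if_neg (by exact_mod_cast by omega), decide_eq_false (by omega)]
    simp
  · -- length ≥ 2: B = (s[len-2] == s[len-1])
    have hlastq : s.getLast? = some (s[s.length - 1]'(by omega)) := by
      rw [List.getLast?_eq_getElem?, List.getElem?_eq_getElem (by omega)]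
    rw [PySem.List.pyGet?_neg_one, PySem.List.pyGet?_neg_ofNat s 2 (by omega) hk, hlastq,
      List.getElem?_eq_getElem (by omega), hlast]
    have key : 1 < l.count m ↔ s[s.length - 2]'(by omega) = m := by
      constructor
      · intro hc
        by_contra hne2
        have hlt : s[s.length - 2]'(by omega) < m := by
          have := hlast ▸ hmono (p := s.length - 2) (q := s.length - 1) (by omega) (by omega)
          omega
        have hsplit : s = s.take (s.length - 1) ++ s.drop (s.length - 1) :=
          (List.take_append_drop _ _).symm
        have hdrop : s.drop (s.length - 1) = [m] := by
          rw [List.drop_eq_getElem_cons (by omega), hlast]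
          simp [List.drop_eq_nil_of_le (by omega : s.length ≤ s.length - 1 + 1)]
        have htake : (s.take (s.length - 1)).count m = 0 := by
          rw [List.count_eq_zero]
          intro hmem'
          obtain ⟨i, hi, hti⟩ := List.mem_iff_getElem.mp hmem'
          rw [List.getElem_take] at hti
          have hi' : i < s.length - 1 := lt_of_lt_of_le hi (by simp [List.length_take])
          have : s[i]'(by omega) ≤ s[s.length - 2]'(by omega) := hmono (by omega) (by omega)
          omega
        have : s.count m = 1 := by
          conv_lhs => rw [hsplit]
          rw [List.count_append, htake, hdrop]
          simp
        omega
      · intro heq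
        have hdrop2 : s.drop (s.length - 2) = [m, m] := by
          rw [List.drop_eq_getElem_cons (by omega), heq,
            List.drop_eq_getElem_cons (show s.length - 2 + 1 < s.length by omega)]
          have h21 : s.length - 2 + 1 = s.length - 1 := by omega
          simp only [h21, hlast, List.cons.injEq, true_and]
          exact List.drop_eq_nil_of_le (by omega)
        have h2le : 2 ≤ s.count m := by
          have := (List.drop_sublist (s.length - 2) s).count_le m
          rw [hdrop2] at this
          simpa using this
        omega
    by_cases hc : 1 < l.count m
    · rw [if_pos (by exact_mod_cast hc)]
      simp [key.mp hc, hk]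
    · rw [if_neg (by exact_mod_cast hc)]
      have : s[s.length - 2]'(by omega) ≠ m := fun h => hc (key.mpr h)
      simp [hk]
      exact fun h => this h.symm

-- ===== VERDICT (by name: the statement is the Claim_ definition above) =====
theorem multipleMax_spec : Claim_equal_multipleMax := by
  intro l _ hpre
  exact multipleMax_eq_alt l hpre
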